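-- pv_equiv track=rewrite | github.com/vishalrwt1995/python_auto_trader | gcp_autotrader/src/autotrader/services/universe_service.py | _safe_key_fragment
-- ===== SOURCE A (Python) =====
-- def _safe_key_fragment(key: str) -> str:
--     raw = str(key or "").strip().upper()
--     if not raw:
--         return "UNKNOWN"
--     out = []
--     for ch in raw:
--         if ch.isalnum():
--             out.append(ch)
--         else:
--             out.append("_")
--     collapsed = "".join(out)
--     while "__" in collapsed:
--         collapsed = collapsed.replace("__", "_")
--     return collapsed.strip("_") or "UNKNOWN"
-- ===== SOURCE B (Python) =====
-- def _safe_key_fragment(key: str) -> str: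
--     raw = str(key or "").strip().upper()
--     if not raw:
--         return "UNKNOWN"
--     out = []
--     last_us = False
--     for ch in raw:
--         if ch.isalnum():
--             out.append(ch)
--             last_us = False
--         elif not last_us:
--             out.append("_")
--             last_us = True
--     return "".join(out).strip("_") or "UNKNOWN"
-- ===== Notes on version B (the rewrite author's own statement) =====
-- stated objective: alternative
-- what changed: B collapses runs of non-alphanumeric characters online in a single pass with a last-was-underscore flag, instead of building the full underscored string and repeatedly rescanning and rewriting it with the double-underscore replacement until it reaches a fixpoint.
import Mathlib
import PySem

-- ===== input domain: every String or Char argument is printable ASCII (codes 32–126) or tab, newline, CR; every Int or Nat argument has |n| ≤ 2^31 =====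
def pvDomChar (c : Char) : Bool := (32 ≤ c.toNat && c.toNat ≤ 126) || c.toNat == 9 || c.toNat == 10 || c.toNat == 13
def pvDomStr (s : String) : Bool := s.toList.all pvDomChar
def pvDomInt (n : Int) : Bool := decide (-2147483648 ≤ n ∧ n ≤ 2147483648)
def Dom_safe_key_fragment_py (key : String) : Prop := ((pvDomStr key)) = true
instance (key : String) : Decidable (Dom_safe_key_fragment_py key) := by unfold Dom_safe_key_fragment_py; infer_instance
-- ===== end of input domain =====

-- B collapses underscore runs online in a single pass with a flag, instead of A's repeated double-underscore replacement rescans to a fixpoint.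

-- ===== PORT A =====
-- the 'while "__" in collapsed' loop; fuel = length is a totality guard only
-- (each replace of a present "__" strictly shortens the string, so it always suffices)
def pvCollapseA : Nat → List Char → List Char
  | 0, cs => cs
  | fuel + 1, cs =>
    if PySem.Chars.isIn ['_', '_'] cs then
      pvCollapseA fuel (PySem.Chars.replace cs ['_', '_'] ['_'])
    else cs

def safe_key_fragment_py (key : String) : String :=
  let raw := PySem.Chars.upper (PySem.Chars.strip key.toList)
  if raw = [] then "UNKNOWN"
  else
    let out := raw.foldl
      (fun acc ch => if PySem.Chars.isalnum ch then acc ++ [ch] else acc ++ ['_']) []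
    let collapsed := pvCollapseA out.length out
    let r := PySem.Chars.stripChars collapsed ['_']
    if r = [] then "UNKNOWN" else String.ofList r

-- ===== PORT B =====
def safe_key_fragment_py_alt (key : String) : String :=
  let raw := PySem.Chars.upper (PySem.Chars.strip key.toList)
  if raw = [] then "UNKNOWN"
  else
    let st := raw.foldl
      (fun (st : List Char × Bool) ch =>
        if PySem.Chars.isalnum ch then (st.1 ++ [ch], false)
        else if st.2 then st
        else (st.1 ++ ['_'], true)) ([], false)
    let r := PySem.Chars.stripChars st.1 ['_']
    if r = [] then "UNKNOWN" else String.ofList r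

-- ===== PRECONDITION & SPEC =====
def Spec_safe_key_fragment_py (key : String) (out : String) : Prop := out = safe_key_fragment_py_alt key
instance (key : String) (out : String) : Decidable (Spec_safe_key_fragment_py key out) := by unfold Spec_safe_key_fragment_py; infer_instance

-- ===== CLAIM (what is proved, stated in full; the proofs are below) =====
def Claim_equal_safe_key_fragment_py : Prop := ∀ (key : String), Dom_safe_key_fragment_py key → Spec_safe_key_fragment_py key (safe_key_fragment_py key)

-- ===== LEMMAS AND PROOFS =====

-- clean restatement of one pass of Chars.replace cs "__" "_"
def pvRep1 : List Char → List Char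
  | '_' :: '_' :: t => '_' :: pvRep1 t
  | c :: t => c :: pvRep1 t
  | [] => []

-- collapse runs of '_' to a single '_'; b = "previous emitted char was '_'"
def pvSq (b : Bool) : List Char → List Char
  | [] => []
  | c :: t => if c = '_' then (if b then pvSq true t else '_' :: pvSq true t) else c :: pvSq false t

-- B's flag-pass, on the raw (unmapped) characters
def pvG (b : Bool) : List Char → List Char
  | [] => []
  | ch :: t =>
    if PySem.Chars.isalnum ch then ch :: pvG false t
    else if b then pvG true t
    else '_' :: pvG true t

def pvF (ch : Char) : Char := if PySem.Chars.isalnum ch then ch else '_'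

theorem pvRep1_len_le (cs : List Char) : (pvRep1 cs).length ≤ cs.length := by
  induction cs using pvRep1.induct with
  | case1 t ih => simp [pvRep1]; omega
  | case2 c t h ih => simp [pvRep1]; exact ih
  | case3 => simp [pvRep1]

theorem pvRep1_len_lt (cs : List Char) (h : ['_', '_'] <:+: cs) :
    (pvRep1 cs).length < cs.length := by
  induction cs using pvRep1.induct with
  | case1 t ih =>
    have := pvRep1_len_le t
    simp [pvRep1]; omega
  | case2 c t hne ih =>
    have h' : ['_', '_'] <:+: t := by
      rcases List.infix_cons_iff.mp h with hp | hi
      · rcases List.cons_prefix_cons.mp hp with ⟨hc, hp2⟩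
        cases t with
        | nil => simp at hp2
        | cons d t' =>
          rcases List.cons_prefix_cons.mp hp2 with ⟨hd, -⟩
          exact (hne t' hc.symm (by rw [← hd])).elim
      · exact hi
    have hx := ih h'
    simp [pvRep1]
    omega
  | case3 => simp at h

theorem pvSq_rep1 (cs : List Char) : ∀ b, pvSq b (pvRep1 cs) = pvSq b cs := by
  induction cs using pvRep1.induct with
  | case1 t ih =>
    intro b
    cases b <;> simp [pvRep1, pvSq, ih]
  | case2 c t h ih =>
    intro b
    have e : pvRep1 (c :: t) = c :: pvRep1 t := by simp [pvRep1]
    rw [e]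
    by_cases hc : c = '_' <;> cases b <;> simp [pvSq, hc, ih]
  | case3 => intro b; rfl

theorem pvSq_true_eq_false (t : List Char) (h : ∀ d t', t = d :: t' → d ≠ '_') :
    pvSq true t = pvSq false t := by
  cases t with
  | nil => rfl
  | cons d t' => simp [pvSq, h d t' rfl]

theorem pvSq_of_noDD (cs : List Char) (h : ¬ ['_', '_'] <:+: cs) : pvSq false cs = cs := by
  induction cs with
  | nil => rfl
  | cons c t ih =>
    have ht : ¬ ['_', '_'] <:+: t := fun hi => h (List.infix_cons_iff.mpr (Or.inr hi))
    by_cases hc : c = '_'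
    · subst hc
      have hhd : ∀ d t', t = d :: t' → d ≠ '_' := by
        intro d t' he; subst he
        intro hd; subst hd
        exact h (List.infix_cons_iff.mpr (Or.inl (by simp)))
      simp [pvSq, pvSq_true_eq_false t hhd, ih ht]
    · simp [pvSq, hc, ih ht]

theorem pvGo_eq (fuel : Nat) : ∀ (l acc : List Char), l.length ≤ fuel →
    PySem.Chars.replace.go ['_', '_'] ['_'] fuel l acc = acc.reverse ++ pvRep1 l := by
  induction fuel with
  | zero =>
    intro l acc h
    have : l = [] := List.eq_nil_of_length_eq_zero (Nat.le_zero.mp h)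
    subst this
    rw [PySem.Chars.replace.go]; simp [pvRep1]
  | succ fuel ih =>
    intro l acc h
    cases l with
    | nil =>
      rw [PySem.Chars.replace.go]
      · simp [pvRep1]
      · omega
    | cons c t =>
      rw [PySem.Chars.replace.go]
      by_cases hp : (['_', '_'] : List Char).isPrefixOf (c :: t) = true
      · simp only [hp, if_true]
        rcases List.cons_prefix_cons.mp (List.isPrefixOf_iff_prefix.mp hp) with ⟨hc, hp2⟩
        cases t with
        | nil => simp at hp2
        | cons d t' =>
          rcases List.cons_prefix_cons.mp hp2 with ⟨hd, -⟩
          subst hc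
          have hd' : d = '_' := hd.symm
          subst hd'
          have hdrop : List.drop (['_', '_'] : List Char).length ('_' :: '_' :: t') = t' := rfl
          rw [hdrop, ih t' _ (by simp at h; omega)]
          simp [pvRep1]
      · simp only [hp, if_false, Bool.false_eq_true]
        rw [ih t (c :: acc) (by simp at h; omega)]
        have hguard : ∀ t', c = '_' → t = '_' :: t' → False := by
          intro t' hc ht; subst hc; subst ht
          exact hp (by simp)
        have e : pvRep1 (c :: t) = c :: pvRep1 t := by
          simp only [pvRep1]
        rw [e]; simp

theorem pvReplace_eq (cs : List Char) :
    PySem.Chars.replace cs ['_', '_'] ['_'] = pvRep1 cs := by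
  rw [PySem.Chars.replace]
  simp only [List.isEmpty_cons, if_false, Bool.false_eq_true]
  simpa using pvGo_eq cs.length cs [] le_rfl

theorem pvCollapseA_eq (fuel : Nat) : ∀ cs : List Char, cs.length ≤ fuel →
    pvCollapseA fuel cs = pvSq false cs := by
  induction fuel with
  | zero =>
    intro cs h
    have : cs = [] := List.eq_nil_of_length_eq_zero (Nat.le_zero.mp h)
    subst this; rfl
  | succ fuel ih =>
    intro cs h
    by_cases hin : PySem.Chars.isIn ['_', '_'] cs = true
    · have hinf : ['_', '_'] <:+: cs := (PySem.Chars.isIn_iff_infix _ _).mp hin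
      have hlt := pvRep1_len_lt cs hinf
      simp only [pvCollapseA, hin, if_true, pvReplace_eq]
      rw [ih _ (by omega)]
      exact pvSq_rep1 cs false
    · have hninf : ¬ ['_', '_'] <:+: cs := by
        intro hinf; exact hin (((PySem.Chars.isIn_iff_infix _ _).mpr hinf))
      simp only [pvCollapseA, hin, if_false, Bool.false_eq_true]
      exact (pvSq_of_noDD cs hninf).symm

theorem pvFoldA (l : List Char) : ∀ acc,
    l.foldl (fun acc ch => if PySem.Chars.isalnum ch then acc ++ [ch] else acc ++ ['_']) acc
      = acc ++ l.map pvF := by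
  induction l with
  | nil => intro acc; simp
  | cons ch t ih =>
    intro acc
    simp only [List.foldl_cons, List.map_cons, pvF]
    split <;> rw [ih] <;> simp

theorem pvFoldB (l : List Char) : ∀ (acc : List Char) (b : Bool),
    (l.foldl (fun (st : List Char × Bool) ch =>
        if PySem.Chars.isalnum ch then (st.1 ++ [ch], false)
        else if st.2 then st
        else (st.1 ++ ['_'], true)) (acc, b)).1 = acc ++ pvG b l := by
  induction l with
  | nil => intro acc b; simp [pvG]
  | cons ch t ih =>
    intro acc b
    simp only [List.foldl_cons, pvG]
    by_cases h : PySem.Chars.isalnum ch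
    · simp only [h, if_true]; rw [ih]; simp
    · simp only [h, if_false, Bool.false_eq_true]
      cases b with
      | true => simp [ih]
      | false => simp [ih]

theorem pvG_eq_sq (l : List Char) : ∀ b, pvG b l = pvSq b (l.map pvF) := by
  induction l with
  | nil => intro b; simp [pvG, pvSq]
  | cons ch t ih =>
    intro b
    simp only [List.map_cons, pvG, pvSq, pvF]
    by_cases h : PySem.Chars.isalnum ch
    · have hne : ch ≠ '_' := by intro e; subst e; exact absurd h (by decide)
      simp [h, hne, ih]
    · simp only [h, if_false, Bool.false_eq_true, ih, if_true]

-- ===== VERDICT (by name: the statement is the Claim_ definition above) =====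
theorem safe_key_fragment_py_spec : Claim_equal_safe_key_fragment_py := by
  intro key _
  unfold Spec_safe_key_fragment_py safe_key_fragment_py safe_key_fragment_py_alt
  by_cases hr : PySem.Chars.upper (PySem.Chars.strip key.toList) = []
  · simp [hr]
  · simp only [hr, if_false]
    rw [pvFoldA, pvFoldB]
    simp only [List.nil_append]
    rw [pvCollapseA_eq _ _ (by simp), pvG_eq_sq]
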